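-- pv_equiv track=rewrite | github.com/jmegner/CheckioPuzzles | magic-domino.py | allColsOfGoalSum
-- ===== SOURCE A (Python) =====
-- import itertools
--
-- def allColsOfGoalSum(goalSize, goalSum):
--     maxSpotVal = 6
--     allDominos = [
--         (spot1, spot2)
--         for spot1 in range(maxSpotVal + 1)
--         for spot2 in range(spot1, maxSpotVal + 1)
--     ]
--
--     colsOfGoalSum = []
--
--     for colOfAnySum in itertools.combinations(allDominos, goalSize // 2):
--         if sum(itertools.chain.from_iterable(colOfAnySum)) == goalSum:
--             colsOfGoalSum.append(colOfAnySum)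
--
--     return colsOfGoalSum
-- ===== SOURCE B (Python) =====
-- def allColsOfGoalSum(goalSize, goalSum):
--     dominoes = [(s1, s2) for s1 in range(7) for s2 in range(s1, 7)]
--     n = len(dominoes)
--     out = []
--     partial = []
--
--     def dfs(i, k, need):
--         if k == 0:
--             if need == 0:
--                 out.append(tuple(partial))
--             return
--         if k < 0 or need < 0 or need > 12 * k or n - i < k:
--             return
--         d = dominoes[i]
--         partial.append(d)
--         dfs(i + 1, k - 1, need - d[0] - d[1])
--         partial.pop()
--         dfs(i + 1, k, need)
--
--     dfs(0, goalSize // 2, goalSum)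
--     return out
-- ===== Notes on version B (the rewrite author's own statement) =====
-- stated objective: faster
-- what changed: Replaces the exhaustive scan over all C(28,k) combinations with a DFS over dominoes in index order keeping a running remaining sum, pruning branches whose target is negative, exceeds 12 per remaining pick, or needs more dominoes than remain; intended as faster (a timing run saw A time out where B still answered, 7.88x at the largest size both finished, but could not confirm the label).
-- crash fix: For goalSize < 0 A raises ValueError (itertools.combinations with negative r) while B naturally returns []. — e.g. on allColsOfGoalSum(-1, 0): A raises ValueError, B returns []
import Mathlib
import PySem

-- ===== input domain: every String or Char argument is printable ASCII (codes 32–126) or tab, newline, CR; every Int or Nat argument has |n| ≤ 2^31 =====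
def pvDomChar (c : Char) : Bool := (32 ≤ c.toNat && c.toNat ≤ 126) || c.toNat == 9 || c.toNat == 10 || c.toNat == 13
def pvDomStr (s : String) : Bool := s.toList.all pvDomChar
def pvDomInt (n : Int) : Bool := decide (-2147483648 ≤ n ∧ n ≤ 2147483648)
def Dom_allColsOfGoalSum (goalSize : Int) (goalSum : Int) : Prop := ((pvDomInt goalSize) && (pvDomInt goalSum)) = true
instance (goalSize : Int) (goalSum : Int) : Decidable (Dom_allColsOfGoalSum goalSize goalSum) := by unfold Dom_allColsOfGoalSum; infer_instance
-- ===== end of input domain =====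

-- B replaces the exhaustive combinations scan with a pruned DFS (running remaining sum and
-- remaining-count pruning); intended as faster (a timing run saw A time out where B answered,
-- but did not confirm the label at sizes both finished).


-- ===== PORT A =====
-- itertools.combinations(pool, r), ported as the standard lexicographic-by-index recursion.
def pvCombos : List (Int × Int) → Int → List (List (Int × Int))
  | xs, r =>
    if r = 0 then [[]]
    else if (xs.length : Int) < r then []   -- itertools.combinations yields nothing when r > len(pool)
    else match xs with
      | [] => []
      | x :: rest => ((pvCombos rest (r - 1)).map (fun c => x :: c)) ++ pvCombos rest r

-- sum(itertools.chain.from_iterable(col))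
def pvColSum (col : List (Int × Int)) : Int :=
  col.foldl (fun s d => s + d.1 + d.2) 0

def allColsOfGoalSum (goalSize : Int) (goalSum : Int) : List (List (Int × Int)) :=
  let maxSpotVal : Int := 6
  let allDominos : List (Int × Int) :=
    (PySem.List.pyRange 0 (maxSpotVal + 1) 1).flatMap (fun s1 =>
      (PySem.List.pyRange s1 (maxSpotVal + 1) 1).map (fun s2 => (s1, s2)))
  (pvCombos allDominos (PySem.Int.floordiv goalSize 2)).foldl
    (fun acc c => if pvColSum c = goalSum then acc ++ [c] else acc) []

-- ===== PORT B =====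
def pvDfs : List (Int × Int) → Int → Int → List (List (Int × Int))
  | xs, k, need =>
    if k = 0 then (if need = 0 then [[]] else [])
    else if k < 0 ∨ need < 0 ∨ need > 12 * k ∨ (xs.length : Int) < k then []
    else match xs with
      | [] => []
      | d :: rest =>
        ((pvDfs rest (k - 1) (need - d.1 - d.2)).map (fun c => d :: c)) ++ pvDfs rest k need

def allColsOfGoalSum_alt (goalSize : Int) (goalSum : Int) : List (List (Int × Int)) :=
  let dominoes : List (Int × Int) :=
    (PySem.List.pyRange 0 7 1).flatMap (fun s1 =>
      (PySem.List.pyRange s1 7 1).map (fun s2 => (s1, s2)))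
  pvDfs dominoes (PySem.Int.floordiv goalSize 2) goalSum

-- ===== PRECONDITION & SPEC =====
-- Pre_ excludes goalSize < 0, on which itertools.combinations raises ValueError in A.
def Pre_allColsOfGoalSum (goalSize : Int) (goalSum : Int) : Prop := 0 ≤ goalSize
instance (goalSize : Int) (goalSum : Int) : Decidable (Pre_allColsOfGoalSum goalSize goalSum) := by unfold Pre_allColsOfGoalSum; infer_instance
def pvWitness_allColsOfGoalSum : Int × Int := (4, 5)

-- For goalSize < 0 A raises ValueError (combinations with negative r) while B returns [].
def Raises_allColsOfGoalSum (goalSize : Int) (goalSum : Int) : Prop := goalSize < 0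
instance (goalSize : Int) (goalSum : Int) : Decidable (Raises_allColsOfGoalSum goalSize goalSum) := by unfold Raises_allColsOfGoalSum; infer_instance
def pvRaiseWitness_allColsOfGoalSum : Int × Int := (-1, 0)
def pvRaiseWitnessOut_allColsOfGoalSum : List (List (Int × Int)) := []

def Spec_allColsOfGoalSum (goalSize : Int) (goalSum : Int) (out : List (List (Int × Int))) : Prop := out = allColsOfGoalSum_alt goalSize goalSum
instance (goalSize : Int) (goalSum : Int) (out : List (List (Int × Int))) : Decidable (Spec_allColsOfGoalSum goalSize goalSum out) := by unfold Spec_allColsOfGoalSum; infer_instance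

-- ===== CLAIM (what is proved, stated in full; the proofs are below) =====
def Claim_equal_allColsOfGoalSum : Prop := ∀ (goalSize : Int) (goalSum : Int), Dom_allColsOfGoalSum goalSize goalSum → Pre_allColsOfGoalSum goalSize goalSum → Spec_allColsOfGoalSum goalSize goalSum (allColsOfGoalSum goalSize goalSum)
def Claim_raises_allColsOfGoalSum : Prop := (∀ (goalSize : Int) (goalSum : Int), Dom_allColsOfGoalSum goalSize goalSum → Raises_allColsOfGoalSum goalSize goalSum → ¬ Pre_allColsOfGoalSum goalSize goalSum) ∧ (Dom_allColsOfGoalSum (pvRaiseWitness_allColsOfGoalSum.1) (pvRaiseWitness_allColsOfGoalSum.2) ∧ Raises_allColsOfGoalSum (pvRaiseWitness_allColsOfGoalSum.1) (pvRaiseWitness_allColsOfGoalSum.2) ∧ allColsOfGoalSum_alt (pvRaiseWitness_allColsOfGoalSum.1) (pvRaiseWitness_allColsOfGoalSum.2) = pvRaiseWitnessOut_allColsOfGoalSum)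

-- ===== LEMMAS AND PROOFS =====

-- every member of pvCombos xs k is a length-k sublist of xs
theorem pvCombos_mem {xs : List (Int × Int)} {k : Int} {c : List (Int × Int)}
    (h : c ∈ pvCombos xs k) : (c.length : Int) = k ∧ ∀ d ∈ c, d ∈ xs := by
  induction xs generalizing k c with
  | nil =>
    rw [pvCombos] at h
    split at h
    · simp_all
    · split at h <;> simp at h
  | cons x rest ih =>
    rw [pvCombos] at h
    split at h
    · simp_all
    · split at h
      · simp at h
      rcases List.mem_append.1 h with h1 | h1
      · obtain ⟨c', hc', rfl⟩ := List.mem_map.1 h1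
        obtain ⟨hl, hm⟩ := ih hc'
        refine ⟨by simpa using by omega, ?_⟩
        intro d hd
        rcases List.mem_cons.1 hd with rfl | hd
        · exact List.mem_cons_self
        · exact List.mem_cons_of_mem _ (hm d hd)
      · obtain ⟨hl, hm⟩ := ih h1
        exact ⟨hl, fun d hd => List.mem_cons_of_mem _ (hm d hd)⟩

theorem pvCombos_nil_of_big {xs : List (Int × Int)} {k : Int}
    (hk : (xs.length : Int) < k) : pvCombos xs k = [] := by
  have h0 : ¬ k = 0 := by have := Int.natCast_nonneg xs.length; omega
  rw [pvCombos.eq_def]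
  simp only []
  rw [if_neg h0, if_pos hk]

theorem pvColSum_bounds {xs : List (Int × Int)} (hb : ∀ d ∈ xs, 0 ≤ d.1 + d.2 ∧ d.1 + d.2 ≤ 12)
    {c : List (Int × Int)} (hc : ∀ d ∈ c, d ∈ xs) :
    0 ≤ pvColSum c ∧ pvColSum c ≤ 12 * (c.length : Int) := by
  unfold pvColSum
  induction c with
  | nil => simp
  | cons d c ih =>
    have hd := hb d (hc d List.mem_cons_self)
    have ih' := ih (fun e he => hc e (List.mem_cons_of_mem _ he))
    rw [List.foldl_cons]
    have shift : ∀ (c' : List (Int × Int)) (a : Int),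
        c'.foldl (fun s d => s + d.1 + d.2) a = a + c'.foldl (fun s d => s + d.1 + d.2) 0 := by
      intro c'
      induction c' with
      | nil => simp
      | cons e c' ihc =>
        intro a
        rw [List.foldl_cons, List.foldl_cons, ihc, ihc (0 + e.1 + e.2)]
        ring
    rw [shift]
    constructor
    · omega
    · simp only [List.length_cons]
      push_cast
      omega

-- main invariant: the pruned DFS computes exactly the sum-filtered combinations
theorem pvDfs_eq_filter (xs : List (Int × Int))
    (hb : ∀ d ∈ xs, 0 ≤ d.1 + d.2 ∧ d.1 + d.2 ≤ 12) (k need : Int) (hk : 0 ≤ k) :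
    pvDfs xs k need = (pvCombos xs k).filter (fun c => pvColSum c = need) := by
  induction xs generalizing k need with
  | nil =>
    rw [pvDfs, pvCombos]
    by_cases h0 : k = 0
    · simp only [h0]
      by_cases hn : need = 0
      · simp [hn, pvColSum]
      · simp [hn, pvColSum, eq_comm]
    · simp [h0]
  | cons d rest ih =>
    have hbr : ∀ e ∈ rest, 0 ≤ e.1 + e.2 ∧ e.1 + e.2 ≤ 12 :=
      fun e he => hb e (List.mem_cons_of_mem _ he)
    have hd := hb d List.mem_cons_self
    rw [pvDfs]
    by_cases h0 : k = 0
    · rw [pvCombos]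
      simp only [h0]
      by_cases hn : need = 0
      · simp [hn, pvColSum]
      · simp [hn, pvColSum, eq_comm]
    · simp only [if_neg h0]
      by_cases hpr : k < 0 ∨ need < 0 ∨ need > 12 * k ∨ (((d :: rest).length : Int) < k)
      · rw [if_pos hpr]
        symm
        rw [List.filter_eq_nil_iff]
        intro c hc
        rcases hpr with h | h | h | h
        · omega
        · obtain ⟨hl, hm⟩ := pvCombos_mem hc
          obtain ⟨hlo, hhi⟩ := pvColSum_bounds hb hm
          simp only [decide_eq_true_eq]; omega
        · obtain ⟨hl, hm⟩ := pvCombos_mem hc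
          obtain ⟨hlo, hhi⟩ := pvColSum_bounds hb hm
          simp only [decide_eq_true_eq]; omega
        · rw [pvCombos_nil_of_big h] at hc; simp at hc
      · have h4 : ¬ (((d :: rest).length : Int) < k) :=
          fun hh => hpr (Or.inr (Or.inr (Or.inr hh)))
        have hunf : pvCombos (d :: rest) k
            = ((pvCombos rest (k - 1)).map (fun c => d :: c)) ++ pvCombos rest k := by
          rw [pvCombos, if_neg h0, if_neg h4]
        rw [if_neg hpr, hunf]
        rw [ih hbr (k - 1) (need - d.1 - d.2) (by omega), ih hbr k need hk]
        rw [List.filter_append, List.filter_map]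
        congr 1
        congr 1
        apply List.filter_congr
        intro c _
        simp only [Function.comp]
        have hcons : pvColSum (d :: c) = d.1 + d.2 + pvColSum c := by
          unfold pvColSum
          rw [List.foldl_cons]
          have shift : ∀ (c' : List (Int × Int)) (a : Int),
              c'.foldl (fun s e => s + e.1 + e.2) a = a + c'.foldl (fun s e => s + e.1 + e.2) 0 := by
            intro c'
            induction c' with
            | nil => simp
            | cons e c' ihc =>
              intro a
              rw [List.foldl_cons, List.foldl_cons, ihc, ihc (0 + e.1 + e.2)]
              ring
          rw [shift]
          ring
        exact decide_eq_decide.mpr (by rw [hcons]; constructor <;> intro h <;> omega)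

-- ===== VERDICT (by name: the statement is the Claim_ definition above) =====
theorem allColsOfGoalSum_spec : Claim_equal_allColsOfGoalSum := by
  intro goalSize goalSum _hdom hpre
  unfold Spec_allColsOfGoalSum allColsOfGoalSum allColsOfGoalSum_alt
  simp only
  norm_num only
  rw [PySem.List.foldl_append_ite_eq_filter]
  rw [pvDfs_eq_filter _ (by decide) _ _ ?_]
  · simp
  · have : PySem.Int.floordiv goalSize 2 = goalSize / 2 :=
      PySem.Int.floordiv_eq_ediv_of_pos (by omega)
    rw [this]
    exact Int.ediv_nonneg hpre (by omega)

@[simp] theorem allColsOfGoalSum_raises : Claim_raises_allColsOfGoalSum := by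
  unfold Claim_raises_allColsOfGoalSum
  exact ⟨by intro a b _ h; unfold Raises_allColsOfGoalSum at h; unfold Pre_allColsOfGoalSum; omega,
    by decide⟩
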